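-- pv_equiv track=rewrite | github.com/aliyun/alibabacloud-odps-maxframe-client | core/maxframe/utils/utils.py | calc_nsplits
-- ===== SOURCE A (Python) =====
-- from typing import (
--     Any,
--     Callable,
--     Dict,
--     Generator,
--     Iterable,
--     List,
--     Optional,
--     Tuple,
--     Type,
--     Union,
-- )
--
-- def calc_nsplits(chunk_idx_to_shape: Dict[Tuple[int], Tuple[int]]) -> Tuple[Tuple[int]]:
--     """
--     Calculate a tiled entity's nsplits.
--
--     Parameters
--     ----------
--     chunk_idx_to_shape : Dict type, {chunk_idx: chunk_shape}
--
--     Returns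
--     -------
--     nsplits
--     """
--     ndim = len(next(iter(chunk_idx_to_shape)))
--     tileable_nsplits = []
--     # for each dimension, record chunk shape whose index is zero on other dimensions
--     for i in range(ndim):
--         splits = []
--         for index, shape in chunk_idx_to_shape.items():
--             if all(idx == 0 for j, idx in enumerate(index) if j != i):
--                 splits.append(shape[i])
--         tileable_nsplits.append(tuple(splits))
--     return tuple(tileable_nsplits)
-- ===== SOURCE B (Python) =====
-- def calc_nsplits(chunk_idx_to_shape):
--     """Single pass over the chunks: a chunk contributes its shape to dimension i
--     exactly when its index is zero everywhere except possibly at i, i.e. when its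
--     set of nonzero coordinates is empty (contributes to every dimension) or is
--     exactly {p} (contributes shape[p] to dimension p only)."""
--     ndim = len(next(iter(chunk_idx_to_shape)))
--     splits = [[] for _ in range(ndim)]
--     for index, shape in chunk_idx_to_shape.items():
--         nonzero = [j for j, idx in enumerate(index) if idx != 0]
--         if not nonzero:
--             for i in range(ndim):
--                 splits[i].append(shape[i])
--         elif len(nonzero) == 1:
--             p = nonzero[0]
--             if p < ndim:
--                 splits[p].append(shape[p])
--     return tuple(tuple(s) for s in splits)
-- ===== Notes on version B (the rewrite author's own statement) =====
-- stated objective: faster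
-- what changed: Instead of scanning the whole dict once per dimension and re-testing 'all other coordinates zero' with an O(ndim) generator for each (dimension, chunk) pair, B makes one pass over the dict, computes each index's nonzero coordinate positions once, and appends the shape to every dimension list (all-zero index) or to the single matching dimension list (exactly one nonzero position).
import Mathlib
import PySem

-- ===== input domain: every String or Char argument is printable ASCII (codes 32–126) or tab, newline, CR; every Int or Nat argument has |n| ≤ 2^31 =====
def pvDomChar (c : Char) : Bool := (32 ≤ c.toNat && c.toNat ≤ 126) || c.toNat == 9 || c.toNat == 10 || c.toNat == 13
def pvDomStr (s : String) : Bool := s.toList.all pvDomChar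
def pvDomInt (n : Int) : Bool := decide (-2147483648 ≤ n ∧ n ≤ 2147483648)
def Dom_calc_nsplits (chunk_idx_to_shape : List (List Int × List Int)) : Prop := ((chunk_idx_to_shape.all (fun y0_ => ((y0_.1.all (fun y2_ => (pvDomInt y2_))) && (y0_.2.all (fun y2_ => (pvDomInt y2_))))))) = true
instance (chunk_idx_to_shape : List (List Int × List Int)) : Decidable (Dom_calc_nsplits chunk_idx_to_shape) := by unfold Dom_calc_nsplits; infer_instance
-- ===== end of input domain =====

-- B replaces A's per-dimension rescans of the whole dict (an O(ndim) zero-test per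
-- (dimension, chunk) pair) by ONE pass that computes each index's nonzero positions once
-- and routes the shape to the affected dimension list(s); a timing run measured it faster.

-- ===== PORT A =====
-- Python's 'all(idx == 0 for j, idx in enumerate(index) if j != i)'
def pvCond (idx : List Int) (i : Nat) : Bool :=
  (PySem.List.enumerate idx).all (fun jv => jv.1 == (i : Int) || jv.2 == 0)

-- 'ndim = len(next(iter(d)))': first key's length (Pre_ makes the list nonempty);
-- 'shape[i]' with 0 ≤ i < len(shape) under Pre_, ported as getD.
def calc_nsplits (chunk_idx_to_shape : List (List Int × List Int)) : List (List Int) :=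
  let ndim := ((chunk_idx_to_shape.headD ([], [])).1).length
  (List.range ndim).map (fun i =>
    chunk_idx_to_shape.foldl
      (fun splits p => if pvCond p.1 i then splits ++ [p.2.getD i 0] else splits) [])

-- ===== PORT B =====
-- 'nonzero = [j for j, idx in enumerate(index) if idx != 0]'
def pvNonzero (idx : List Int) : List Int :=
  ((PySem.List.enumerate idx).filter (fun jv => jv.2 != 0)).map Prod.fst

-- the body of Source B's single 'for index, shape' loop
def pvStepB (ndim : Nat) (splits : List (List Int)) (p : List Int × List Int) :
    List (List Int) :=
  match pvNonzero p.1 with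
  | [] => (List.range ndim).foldl (fun s i => s.modify i (fun t => t ++ [p.2.getD i 0])) splits
  | [q] => if q < (ndim : Int) then splits.modify q.toNat (fun t => t ++ [p.2.getD q.toNat 0])
           else splits
  | _ => splits

def calc_nsplits_alt (chunk_idx_to_shape : List (List Int × List Int)) : List (List Int) :=
  let ndim := ((chunk_idx_to_shape.headD ([], [])).1).length
  chunk_idx_to_shape.foldl (pvStepB ndim) (List.replicate ndim [])

-- ===== PRECONDITION & SPEC =====
-- Pre_ excludes: the empty dict (A raises StopIteration on next(iter(...))); inputs where a
-- chunk selected for dimension i has a shape shorter than i+1 (A raises IndexError on shape[i]);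
-- and association lists with duplicate keys, which do not denote a Python dict (the
-- overwrite-on-reinsertion value Python's dict would present is accidental for a key list).
def Pre_calc_nsplits (chunk_idx_to_shape : List (List Int × List Int)) : Prop :=
  chunk_idx_to_shape ≠ [] ∧
  (chunk_idx_to_shape.map Prod.fst).Nodup ∧
  ∀ p ∈ chunk_idx_to_shape, ∀ i < ((chunk_idx_to_shape.headD ([], [])).1).length,
    pvCond p.1 i = true → i < p.2.length

instance (chunk_idx_to_shape : List (List Int × List Int)) : Decidable (Pre_calc_nsplits chunk_idx_to_shape) := by unfold Pre_calc_nsplits; infer_instance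

def pvWitness_calc_nsplits : (List (List Int × List Int)) :=
  [([0, 0], [2, 3]), ([0, 1], [2, 4]), ([1, 0], [5, 3])]

def Spec_calc_nsplits (chunk_idx_to_shape : List (List Int × List Int)) (out : List (List Int)) : Prop := out = calc_nsplits_alt chunk_idx_to_shape
instance (chunk_idx_to_shape : List (List Int × List Int)) (out : List (List Int)) : Decidable (Spec_calc_nsplits chunk_idx_to_shape out) := by unfold Spec_calc_nsplits; infer_instance

-- ===== CLAIM (what is proved, stated in full; the proofs are below) =====
def Claim_equal_calc_nsplits : Prop := ∀ (chunk_idx_to_shape : List (List Int × List Int)), Dom_calc_nsplits chunk_idx_to_shape → Pre_calc_nsplits chunk_idx_to_shape → Spec_calc_nsplits chunk_idx_to_shape (calc_nsplits chunk_idx_to_shape)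

-- ===== LEMMAS AND PROOFS =====

-- A's zero-test equals "every nonzero position is i".
theorem pvCond_eq_all_nonzero (idx : List Int) (i : Nat) :
    pvCond idx i = (pvNonzero idx).all (fun q => q == (i : Int)) := by
  unfold pvCond pvNonzero
  induction PySem.List.enumerate idx with
  | nil => rfl
  | cons jv L ih =>
      by_cases h : jv.2 = 0
      · simp [List.all_cons, h, ih]
      · have h2 : (jv.2 == 0) = false := beq_eq_false_iff_ne.mpr h
        simp [List.all_cons, h, h2, ih]

theorem pvNonzero_pairwise (idx : List Int) :
    (pvNonzero idx).Pairwise (fun a b => a < b) := by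
  unfold pvNonzero
  exact (List.Pairwise.filter _ (PySem.List.pairwise_lt_enumerate idx 0)).map _ (fun _ _ h => h)

theorem pvNonzero_nonneg (idx : List Int) : ∀ q ∈ pvNonzero idx, 0 ≤ q := by
  intro q hq
  unfold pvNonzero at hq
  rcases List.mem_map.mp hq with ⟨jv, hjv, rfl⟩
  rcases (PySem.List.mem_enumerate_iff idx 0 jv).mp (List.mem_of_mem_filter hjv) with
    ⟨k, hk, rfl⟩
  simp

-- folding 'modify' over distinct indices, read back pointwise
theorem getElem?_foldl_modify (f : Nat → List Int → List Int) :
    ∀ (js : List Nat), js.Nodup → ∀ (s : List (List Int)) (j : Nat),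
      (js.foldl (fun s2 i => s2.modify i (f i)) s)[j]? =
        if j ∈ js then (f j) <$> s[j]? else s[j]? := by
  intro js
  induction js with
  | nil => simp
  | cons x js ih =>
      intro hnd s j
      rcases List.nodup_cons.mp hnd with ⟨hx, hnd'⟩
      rw [List.foldl_cons, ih hnd']
      by_cases hj : j ∈ js
      · have hne : x ≠ j := fun h => hx (h ▸ hj)
        simp [hj, hne, List.mem_cons]
      · by_cases hxj : x = j
        · subst hxj
          simp [hj]
        · simp [hj, hxj, Ne.symm hxj, List.mem_cons]

theorem foldl_modify_range_map (n : Nat) (f : Nat → List Int → List Int)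
    (g : Nat → List Int) :
    (List.range n).foldl (fun s i => s.modify i (f i)) ((List.range n).map g) =
      (List.range n).map (fun i => f i (g i)) := by
  apply List.ext_getElem?
  intro j
  rw [getElem?_foldl_modify f (List.range n) (List.nodup_range)]
  by_cases hj : j < n
  · simp [List.mem_range, hj]
  · have hn : n ≤ j := Nat.le_of_not_lt hj
    rw [if_neg (by simpa [List.mem_range] using hj),
      List.getElem?_eq_none (by simpa using hn),
      List.getElem?_eq_none (by simpa using hn)]

-- one B-step on a state of shape 'map g over range ndim' performs A's per-dimension step
theorem pvStepB_map (ndim : Nat) (g : Nat → List Int) (p : List Int × List Int) :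
    pvStepB ndim ((List.range ndim).map g) p =
      (List.range ndim).map
        (fun i => if pvCond p.1 i then g i ++ [p.2.getD i 0] else g i) := by
  unfold pvStepB
  have hnn := pvNonzero_nonneg p.1
  have hpw := pvNonzero_pairwise p.1
  have hc : ∀ i : Nat, pvCond p.1 i = (pvNonzero p.1).all (fun q => q == (i : Int)) :=
    fun i => pvCond_eq_all_nonzero p.1 i
  rcases hnz : pvNonzero p.1 with _ | ⟨q, _ | ⟨q2, rest⟩⟩
  · -- no nonzero coordinate: contributes to every dimension
    rw [foldl_modify_range_map]
    refine List.map_congr_left (fun i _ => ?_)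
    simp [hc, hnz]
  · -- exactly one nonzero coordinate q
    have hq0 : 0 ≤ q := hnn q (by simp [hnz])
    by_cases hlt : q < (ndim : Int)
    · have hqn : q.toNat < ndim := by omega
      simp only [if_pos hlt]
      apply List.ext_getElem?
      intro j
      rw [List.getElem?_modify]
      by_cases hj : j < ndim
      · by_cases hje : q.toNat = j
        · have hqj : q = (j : Int) := by omega
          simp [hj, hc, hnz, hqj]
        · have hqj : ¬ (q = (j : Int)) := by omega
          simp [hje, hj, hc, hnz, hqj]
      · simp [List.getElem?_map,
          List.getElem?_eq_none (l := List.range ndim) (by simpa using Nat.le_of_not_lt hj)]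
    · -- q ≥ ndim: no dimension i < ndim matches
      simp only [if_neg hlt]
      symm
      refine List.map_eq_iff.mpr (fun j => ?_)
      by_cases hj : j < ndim
      · have hqj : ¬ (q = (j : Int)) := by
          intro h; apply hlt; omega
        simp [hj, hc, hnz, hqj]
      · simp [List.getElem?_eq_none (l := List.range ndim) (by simpa using Nat.le_of_not_lt hj)]
  · -- two or more nonzero coordinates: contributes nowhere
    have hlt : q < q2 := (List.pairwise_cons.mp (hnz ▸ hpw)).1 q2 (by simp)
    symm
    refine List.map_eq_iff.mpr (fun j => ?_)
    by_cases hj : j < ndim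
    · have : ¬ (q = (j : Int) ∧ q2 = (j : Int) ∧ ∀ x ∈ rest, x = (j : Int)) := by
        rintro ⟨rfl, h2, -⟩; omega
      have hcf : pvCond p.1 j = false := by
        rw [hc, hnz]
        simpa [List.all_cons, and_assoc] using this
      simp [hj, hcf]
    · simp [List.getElem?_eq_none (l := List.range ndim) (by simpa using Nat.le_of_not_lt hj)]

theorem foldl_pvStepB (ndim : Nat) :
    ∀ (l : List (List Int × List Int)) (g : Nat → List Int),
      l.foldl (pvStepB ndim) ((List.range ndim).map g) =
        (List.range ndim).map (fun i =>
          l.foldl (fun s p => if pvCond p.1 i then s ++ [p.2.getD i 0] else s) (g i)) := by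
  intro l
  induction l with
  | nil => intro g; simp
  | cons p rest ih =>
      intro g
      rw [List.foldl_cons, pvStepB_map, ih]
      rfl

-- ===== VERDICT (by name: the statement is the Claim_ definition above) =====
theorem calc_nsplits_spec : Claim_equal_calc_nsplits := by
  intro l _ _
  unfold Spec_calc_nsplits calc_nsplits calc_nsplits_alt
  dsimp only
  have hrep : (List.replicate ((l.headD ([], [])).1).length ([] : List Int)) =
      (List.range ((l.headD ([], [])).1).length).map (fun _ => ([] : List Int)) := by
    rw [show (fun _ : Nat => ([] : List Int)) = Function.const Nat ([] : List Int) from rfl,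
      List.map_const, List.length_range]
  rw [hrep, foldl_pvStepB]
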